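-- pv_equiv track=rewrite | github.com/Paankhuri17/SudokuRepo | Sudoku_app/views.py | rem_list
-- ===== SOURCE A (Python) =====
-- def sudoku_row(a,r):                    #elements of the particular row
--     r1=[]
--     for i in range(len(a[r[0]])):
--         r1.append([r[0],i])
--     return(r1)
--
-- def sudoku_column(a,c):                 #elements of the particular column
--     b=[]
--     for i in range (9):
--         b.append([i,c[1]])
--     return b
--
-- class box_def:                          #elements of that particular block
--     def r(loc):
--         rn=loc[0]
--         if rn<3 and rn>=0:
--             return [0,3]
--         if rn<6 and rn>=3:
--             return [3,6]
--         if rn<9 and rn>=6: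
--             return [6,9]
--
--     def c(loc):
--         cn=loc[1]
--         x=[]
--         if cn<3 and cn>=0:
--             bn=box_def.r(loc)
--             for i in range(0,3):
--                 for j in range(bn[0],bn[1]):
--                     x.append([j,i])
--         if cn<6 and cn>=3:
--             bn=box_def.r(loc)
--             for i in range(3,6):
--                 for j in range(bn[0],bn[1]):
--                     x.append([j,i])
--         if cn<9 and cn>=6:
--             bn=box_def.r(loc)
--             for i in range(6,9):
--                 for j in range(bn[0],bn[1]):
--                     x.append([j,i])
--         return(x)
--
-- def rem_list(a,r,l):                        #removes all the locations that are blocked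
--     for j in box_def.c(r):
--         if j in l:
--             l.remove(j)
--     for j in sudoku_row(a,r):
--         if j in l:
--             l.remove(j)
--     for j in sudoku_column(a,r):
--         if j in l:
--             l.remove(j)
--     return(l)
-- ===== SOURCE B (Python) =====
-- def _blocked(a, r):
--     """All blocked cells (box, then row, then column) as one list; multiplicities matter."""
--     rn, cn = r[0], r[1]
--     cells = []
--     if 0 <= rn < 9 and 0 <= cn < 9:
--         br, bc = rn // 3 * 3, cn // 3 * 3
--         cells += [[br + j, bc + i] for i in range(3) for j in range(3)]
--     cells += [[rn, i] for i in range(len(a[rn]))]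
--     cells += [[i, cn] for i in range(9)]
--     return cells
--
-- def rem_list(a, r, l):
--     # one pass over l guided by a multiset (dict of counts) of blocked cells;
--     # writes the result back in place like the original
--     need = {}
--     for cell in _blocked(a, r):
--         k = tuple(cell)
--         need[k] = need.get(k, 0) + 1
--     kept = []
--     for cell in l:
--         k = tuple(cell)
--         c = need.get(k, 0)
--         if c:
--             need[k] = c - 1
--         else:
--             kept.append(cell)
--     l[:] = kept
--     return l
-- ===== Notes on version B (the rewrite author's own statement) =====
-- stated objective: faster
-- what changed: Instead of three remove-loops that each scan l with 'in'/'remove' per blocked cell, B builds one multiset (dict of counts) of all blocked cells and filters l in a single pass, decrementing counts; the result is written back in place as in A.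
import Mathlib
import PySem

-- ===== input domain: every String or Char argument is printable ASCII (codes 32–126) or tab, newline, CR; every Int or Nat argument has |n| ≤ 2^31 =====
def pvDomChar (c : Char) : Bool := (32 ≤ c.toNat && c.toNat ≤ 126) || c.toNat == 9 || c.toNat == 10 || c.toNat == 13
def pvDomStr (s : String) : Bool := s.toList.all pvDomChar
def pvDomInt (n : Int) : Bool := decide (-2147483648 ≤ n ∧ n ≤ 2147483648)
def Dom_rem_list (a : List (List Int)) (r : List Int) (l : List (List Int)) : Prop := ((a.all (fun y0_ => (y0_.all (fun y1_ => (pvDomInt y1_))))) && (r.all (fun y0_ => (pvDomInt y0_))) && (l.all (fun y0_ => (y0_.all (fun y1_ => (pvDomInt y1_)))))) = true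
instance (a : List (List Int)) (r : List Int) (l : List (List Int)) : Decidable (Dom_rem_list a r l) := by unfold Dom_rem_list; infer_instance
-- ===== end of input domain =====

-- B replaces A's three scan-and-remove loops by one multiset (count dict) of blocked cells and a single
-- filtering pass over l (faster by a constant factor); both A and B mutate l in place in Python — the
-- equivalence proved here is about the return value.


-- ===== PORT A =====
def pySudokuRow (a : List (List Int)) (r : List Int) : List (List Int) :=
  let r0 := (PySem.List.pyGet? r 0).getD 0      -- exact under Pre_ (r has ≥ 2 elements)
  let row := (PySem.List.pyGet? a r0).getD []   -- exact under Pre_ (r0 a valid, possibly negative, index)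
  (PySem.List.pyRange 0 (row.length : Int) 1).map (fun i => [r0, i])

def pySudokuColumn (a : List (List Int)) (c : List Int) : List (List Int) :=
  let c1 := (PySem.List.pyGet? c 1).getD 0      -- exact under Pre_
  (PySem.List.pyRange 0 9 1).map (fun i => [i, c1])

def pyBoxR (loc : List Int) : Option (List Int) :=
  let rn := (PySem.List.pyGet? loc 0).getD 0    -- exact under Pre_
  if rn < 3 ∧ 0 ≤ rn then some [0, 3]
  else if rn < 6 ∧ 3 ≤ rn then some [3, 6]
  else if rn < 9 ∧ 6 ≤ rn then some [6, 9]
  else none                                     -- Python returns None here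

-- one column band of the box: the repeated 'for i … for j … x.append([j,i])' body of box_def.c
def pyBoxBand (loc : List Int) (lo hi : Int) : List (List Int) :=
  let bn := (pyBoxR loc).getD [0, 0]            -- .getD only reached outside Pre_ (Python raises TypeError on None)
  (PySem.List.pyRange lo hi 1).flatMap (fun i =>
    (PySem.List.pyRange ((PySem.List.pyGet? bn 0).getD 0) ((PySem.List.pyGet? bn 1).getD 0) 1).map
      (fun j => [j, i]))

def pyBoxC (loc : List Int) : List (List Int) :=
  let cn := (PySem.List.pyGet? loc 1).getD 0    -- exact under Pre_
  let x : List (List Int) := []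
  let x := if cn < 3 ∧ 0 ≤ cn then x ++ pyBoxBand loc 0 3 else x
  let x := if cn < 6 ∧ 3 ≤ cn then x ++ pyBoxBand loc 3 6 else x
  let x := if cn < 9 ∧ 6 ≤ cn then x ++ pyBoxBand loc 6 9 else x
  x

-- 'if j in l: l.remove(j)'
def pyRemStep (l : List (List Int)) (j : List Int) : List (List Int) :=
  if j ∈ l then (PySem.List.remove? l j).getD l else l

def rem_list (a : List (List Int)) (r : List Int) (l : List (List Int)) : List (List Int) :=
  let l1 := (pyBoxC r).foldl pyRemStep l
  let l2 := (pySudokuRow a r).foldl pyRemStep l1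
  (pySudokuColumn a r).foldl pyRemStep l2

-- ===== PORT B =====
def altBlocked (a : List (List Int)) (r : List Int) : List (List Int) :=
  let rn := (PySem.List.pyGet? r 0).getD 0      -- exact under Pre_
  let cn := (PySem.List.pyGet? r 1).getD 0
  let box : List (List Int) :=
    if 0 ≤ rn ∧ rn < 9 ∧ 0 ≤ cn ∧ cn < 9 then
      let br := PySem.Int.floordiv rn 3 * 3
      let bc := PySem.Int.floordiv cn 3 * 3
      (List.range 3).flatMap (fun (i : Nat) => (List.range 3).map (fun (j : Nat) => [br + (j : Int), bc + (i : Int)]))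
    else []
  let row := ((PySem.List.pyGet? a rn).getD []).length   -- exact under Pre_
  box ++ (List.range row).map (fun (i : Nat) => [rn, (i : Int)]) ++ (List.range 9).map (fun (i : Nat) => [(i : Int), cn])

def rem_list_alt (a : List (List Int)) (r : List Int) (l : List (List Int)) : List (List Int) :=
  let need : PySem.Dict (List Int) Int :=
    (altBlocked a r).foldl (fun d k => d.insert k (d.getD k 0 + 1)) PySem.Dict.empty
  (l.foldl
    (fun (s : PySem.Dict (List Int) Int × List (List Int)) cell =>
      let c := s.1.getD cell 0
      if c ≠ 0 then (s.1.insert cell (c - 1), s.2)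
      else (s.1, s.2 ++ [cell]))
    (need, [])).2

-- ===== PRECONDITION & SPEC =====
-- Pre_ is exactly where Python A returns: r needs two entries; a blocked box (0 ≤ r[1] < 9) forces
-- 0 ≤ r[0] < 9 (else box_def.r returns None and bn[0] raises TypeError); and a[r[0]] must be a valid
-- (possibly negative, Python-wrapping) index, else IndexError.
def Pre_rem_list (a : List (List Int)) (r : List Int) (l : List (List Int)) : Prop :=
  2 ≤ r.length ∧
  ((0 ≤ r.getD 1 0 ∧ r.getD 1 0 < 9) → (0 ≤ r.getD 0 0 ∧ r.getD 0 0 < 9)) ∧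
  (-(a.length : Int) ≤ r.getD 0 0 ∧ r.getD 0 0 < (a.length : Int))
instance (a : List (List Int)) (r : List Int) (l : List (List Int)) : Decidable (Pre_rem_list a r l) := by unfold Pre_rem_list; infer_instance

def pvWitness_rem_list : List (List Int) × List Int × List (List Int) :=
  ([[0, 0, 0], [0, 0, 0], [0, 0, 0]], [1, 1], [[0, 0], [5, 5], [1, 2], [5, 5]])

def Spec_rem_list (a : List (List Int)) (r : List Int) (l : List (List Int)) (out : List (List Int)) : Prop := out = rem_list_alt a r l
instance (a : List (List Int)) (r : List Int) (l : List (List Int)) (out : List (List Int)) : Decidable (Spec_rem_list a r l out) := by unfold Spec_rem_list; infer_instance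

-- ===== CLAIM (what is proved, stated in full; the proofs are below) =====
def Claim_equal_rem_list : Prop := ∀ (a : List (List Int)) (r : List Int) (l : List (List Int)), Dom_rem_list a r l → Pre_rem_list a r l → Spec_rem_list a r l (rem_list a r l)

-- ===== LEMMAS AND PROOFS =====

-- A's guarded remove is List.erase
theorem pyRemStep_eq_erase (l : List (List Int)) (j : List Int) : pyRemStep l j = l.erase j := by
  unfold pyRemStep
  by_cases h : j ∈ l
  · simp [h, PySem.List.remove?_eq_some_erase l j h]
  · simp [h, List.erase_of_not_mem h]

theorem foldl_pyRemStep (js : List (List Int)) (l : List (List Int)) :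
    js.foldl pyRemStep l = l.diff js := by
  have : pyRemStep = List.erase := by funext l j; exact pyRemStep_eq_erase l j
  rw [this, List.diff_eq_foldl]

-- B's counting pass computes a diff
theorem foldl_filter_diff (cells : List (List Int)) :
    ∀ (d : PySem.Dict (List Int) Int) (out js : List (List Int)),
    (∀ k, d.getD k 0 = (js.count k : Int)) →
    (cells.foldl
      (fun (s : PySem.Dict (List Int) Int × List (List Int)) cell =>
        let c := s.1.getD cell 0
        if c ≠ 0 then (s.1.insert cell (c - 1), s.2)
        else (s.1, s.2 ++ [cell]))
      (d, out)).2 = out ++ cells.diff js := by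
  induction cells with
  | nil => intro d out js h; simp
  | cons x cs ih =>
    intro d out js h
    rw [List.foldl_cons]
    by_cases hc : d.getD x 0 ≠ 0
    · have hmem : x ∈ js := by
        by_contra hx
        exact hc (by rw [h x, List.count_eq_zero_of_not_mem hx]; rfl)
      have hcount : 1 ≤ js.count x := List.one_le_count_iff.mpr hmem
      rw [show (if d.getD x 0 ≠ 0 then (d.insert x (d.getD x 0 - 1), out)
            else (d, out ++ [x])) = (d.insert x (d.getD x 0 - 1), out) from if_pos hc]
      rw [ih (d.insert x (d.getD x 0 - 1)) out (js.erase x) ?_,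
          List.cons_diff_of_mem hmem]
      intro k
      rw [PySem.Dict.getD_insert]
      by_cases hk : k = x
      · rw [hk, if_pos rfl, h x, List.count_erase_self]
        omega
      · rw [if_neg hk, h k, List.count_erase_of_ne hk]
    · have hmem : x ∉ js := by
        intro hx
        have := List.one_le_count_iff.mpr hx
        rw [h x] at hc; omega
      rw [show (if d.getD x 0 ≠ 0 then (d.insert x (d.getD x 0 - 1), out)
            else (d, out ++ [x])) = (d, out ++ [x]) from if_neg hc]
      rw [ih d (out ++ [x]) js h, List.cons_diff_of_not_mem hmem, List.append_assoc]
      rfl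

theorem rem_list_alt_eq_diff (a : List (List Int)) (r : List Int) (l : List (List Int)) :
    rem_list_alt a r l = l.diff (altBlocked a r) := by
  unfold rem_list_alt
  rw [show ((altBlocked a r).foldl (fun d k => d.insert k (d.getD k 0 + 1)) PySem.Dict.empty)
        = PySem.Dict.counter (altBlocked a r) from
      PySem.Dict.foldl_insert_getD_add_one_eq_counter _]
  exact foldl_filter_diff l _ [] (altBlocked a r) (fun k => PySem.Dict.getD_counter _ _)

-- under Pre_, A's box list equals B's box list
theorem box_eq (r : List Int)
    (h : (0 ≤ r.getD 1 0 ∧ r.getD 1 0 < 9) → (0 ≤ r.getD 0 0 ∧ r.getD 0 0 < 9)) :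
    pyBoxC r =
      (if 0 ≤ (PySem.List.pyGet? r 0).getD 0 ∧ (PySem.List.pyGet? r 0).getD 0 < 9 ∧
          0 ≤ (PySem.List.pyGet? r 1).getD 0 ∧ (PySem.List.pyGet? r 1).getD 0 < 9 then
        (List.range 3).flatMap (fun (i : Nat) => (List.range 3).map (fun (j : Nat) =>
          [PySem.Int.floordiv ((PySem.List.pyGet? r 0).getD 0) 3 * 3 + (j : Int),
           PySem.Int.floordiv ((PySem.List.pyGet? r 1).getD 0) 3 * 3 + (i : Int)]))
      else []) := by
  have e0 : (PySem.List.pyGet? r 0).getD 0 = r.getD 0 0 := by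
    simp [PySem.List.pyGet?_zero, List.getD]
  have e1 : (PySem.List.pyGet? r 1).getD 0 = r.getD 1 0 := by
    simp [pysem]
  simp only [pyBoxC, pyBoxBand, pyBoxR, e0, e1]
  generalize r.getD 0 0 = rn at h ⊢
  generalize r.getD 1 0 = cn at h ⊢
  by_cases hcn : 0 ≤ cn ∧ cn < 9
  · obtain ⟨hr0, hr9⟩ := h hcn
    obtain ⟨hc0, hc9⟩ := hcn
    interval_cases rn <;> interval_cases cn <;> decide
  · rw [if_neg (by omega), if_neg (by omega), if_neg (by omega), if_neg (by omega)]

theorem blocked_eq (a : List (List Int)) (r : List Int) (hp : Pre_rem_list a r []) :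
    pyBoxC r ++ (pySudokuRow a r ++ pySudokuColumn a r) = altBlocked a r := by
  have hrow :
      (PySem.List.pyRange 0
        ((((PySem.List.pyGet? a ((PySem.List.pyGet? r 0).getD 0)).getD []).length : Nat) : Int) 1).map
          (fun i => [(PySem.List.pyGet? r 0).getD 0, i])
      = (List.range ((PySem.List.pyGet? a ((PySem.List.pyGet? r 0).getD 0)).getD []).length).map
          (fun (i : Nat) => [(PySem.List.pyGet? r 0).getD 0, (i : Int)]) := by
    rw [PySem.List.pyRange_zero_natCast, List.map_map]; rfl
  have hcol :
      (PySem.List.pyRange 0 9 1).map (fun i => [i, (PySem.List.pyGet? r 1).getD 0])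
      = (List.range 9).map (fun (i : Nat) => [(i : Int), (PySem.List.pyGet? r 1).getD 0]) := by
    rw [show PySem.List.pyRange 0 9 1 = [0, 1, 2, 3, 4, 5, 6, 7, 8] from by decide,
        show List.range 9 = [0, 1, 2, 3, 4, 5, 6, 7, 8] from by decide]
    rfl
  unfold altBlocked pySudokuRow pySudokuColumn
  rw [box_eq r hp.2.1, hrow, hcol, ← List.append_assoc]

-- ===== VERDICT (by name: the statement is the Claim_ definition above) =====
theorem rem_list_spec : Claim_equal_rem_list := by
  intro a r l _ hp
  show rem_list a r l = rem_list_alt a r l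
  unfold rem_list
  rw [foldl_pyRemStep, foldl_pyRemStep, foldl_pyRemStep,
      ← List.diff_append, ← List.diff_append, rem_list_alt_eq_diff,
      blocked_eq a r ⟨hp.1, hp.2.1, hp.2.2⟩]
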